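-- pv_equiv track=rewrite | github.com/frisbee09/2025-advent-of-code | src/two/solution_one.py | sieve_for_even_counts
-- ===== SOURCE A (Python) =====
-- def sieve_for_even_counts(num: int):
--     """
--     We first try and cheaply throw away any obviously not-pattern-matching
--     values, using string iteration instead of numeric iteration
--     """
--     as_str = str(num)
--
--     if len(as_str) % 2 > 0:
--         # This means the number is of an odd length and can't possibly be 2x
--         # numeric instances. I could do this on the max/min ranges as well but
--         # this is currently performing well enough.
--         return False
--
--     hash = {}
--
--     # The cheapest thing to do it iterate over figures
--     for char in as_str:
--         hash.setdefault(char, 0)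
--         # Count character instances
--         hash[char] += 1
--
--     # If any character count is odd, it fails the check
--     if any([val % 2 > 0 for val in hash.values()]):
--         return False
--
--     return True
-- ===== SOURCE B (Python) =====
-- def sieve_for_even_counts(num: int):
--     # Sort the digits and scan consecutive equal runs; every run must have even length.
--     s = str(num)
--     if len(s) % 2 > 0:
--         return False
--     chars = sorted(s)
--     i = 0
--     n = len(chars)
--     while i < n:
--         j = i
--         while j < n and chars[j] == chars[i]:
--             j += 1
--         if (j - i) % 2 == 1:
--             return False
--         i = j
--     return True
-- ===== Notes on version B (the rewrite author's own statement) =====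
-- stated objective: alternative
-- what changed: B keeps the even-length guard but replaces A's setdefault/increment frequency dictionary and values scan with sorting the characters and scanning consecutive equal runs, failing as soon as a run has odd length.
import Mathlib
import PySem

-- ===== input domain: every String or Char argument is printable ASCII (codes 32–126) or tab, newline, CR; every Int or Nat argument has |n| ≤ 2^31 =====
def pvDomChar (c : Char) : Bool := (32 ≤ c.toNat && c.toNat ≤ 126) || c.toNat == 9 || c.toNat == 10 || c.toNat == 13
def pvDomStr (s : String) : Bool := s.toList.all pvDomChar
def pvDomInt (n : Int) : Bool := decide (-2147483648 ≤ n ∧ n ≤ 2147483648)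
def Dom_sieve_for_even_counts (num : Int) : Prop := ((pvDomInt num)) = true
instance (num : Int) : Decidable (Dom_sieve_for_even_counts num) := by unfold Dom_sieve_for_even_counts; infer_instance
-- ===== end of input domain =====

-- B replaces A's frequency dictionary with a sort-then-run-scan over the digit characters (alternative decomposition, same cost class).

-- ===== PORT A =====
def sieve_for_even_counts (num : Int) : Bool :=
  let as_str := PySem.Int.toChars num
  if as_str.length % 2 > 0 then false
  else
    let hash := as_str.foldl
      (fun d c => (d.setdefault c (0 : Int)).modify c 0 (· + 1)) PySem.Dict.empty
    if hash.values.any (fun v => decide (PySem.Int.mod v 2 > 0)) then false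
    else true

-- ===== PORT B =====
-- the run-scanning while loop of Source B: one run per outer step; j - i = takeWhile length + 1
def pvRunsEven : List Char → Bool
  | [] => true
  | c :: rest =>
    let j := (rest.takeWhile (fun x => x == c)).length + 1
    if j % 2 = 1 then false
    else pvRunsEven (rest.dropWhile (fun x => x == c))
  termination_by l => l.length
  decreasing_by
    simp only [List.length_cons]
    exact Nat.lt_succ_of_le (List.length_dropWhile_le _ _)

def sieve_for_even_counts_alt (num : Int) : Bool :=
  let s := PySem.Int.toChars num
  if s.length % 2 > 0 then false
  else pvRunsEven (PySem.List.sorted s (fun c => c) false)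

-- ===== PRECONDITION & SPEC =====
def Spec_sieve_for_even_counts (num : Int) (out : Bool) : Prop := out = sieve_for_even_counts_alt num
instance (num : Int) (out : Bool) : Decidable (Spec_sieve_for_even_counts num out) := by unfold Spec_sieve_for_even_counts; infer_instance

-- ===== CLAIM (what is proved, stated in full; the proofs are below) =====
def Claim_equal_sieve_for_even_counts : Prop := ∀ (num : Int), Dom_sieve_for_even_counts num → Spec_sieve_for_even_counts num (sieve_for_even_counts num)

-- ===== LEMMAS AND PROOFS =====

-- A's 'setdefault then +=' step is exactly the Counter step.
theorem pv_step_eq {d : PySem.Dict Char Int} {c : Char} :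
    (d.setdefault c (0 : Int)).modify c 0 (· + 1) = d.modify c 0 (· + 1) := by
  by_cases h : d.contains c = true
  · rw [PySem.Dict.setdefault_of_contains d 0 h]
  · have h' : d.contains c = false := by simpa using h
    rw [PySem.Dict.setdefault_of_not_contains d 0 h']
    simp only [PySem.Dict.modify]
    rw [PySem.Dict.getD_insert_self, PySem.Dict.getD_of_not_contains d 0 h',
      PySem.Dict.insert_insert_self]

-- A's dict is Counter(as_str).
theorem pv_fold_eq_counter (l : List Char) :
    l.foldl (fun d c => (d.setdefault c (0 : Int)).modify c 0 (· + 1)) PySem.Dict.empty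
      = PySem.Dict.counter l := by
  rw [PySem.Dict.counter_eq_foldl]
  congr 1
  funext d c
  exact pv_step_eq

-- A's odd-value test, characterised by character counts.
theorem pv_anyA (l : List Char) :
    ((l.foldl (fun d c => (d.setdefault c (0 : Int)).modify c 0 (· + 1)) PySem.Dict.empty).values.any
        (fun v => decide (PySem.Int.mod v 2 > 0)) = true)
      ↔ ∃ c ∈ l, l.count c % 2 = 1 := by
  rw [pv_fold_eq_counter]
  have hv : (PySem.Dict.counter l).values
      = (PySem.Set.ofList l).map (fun k => ((l.count k : Nat) : Int)) := by
    show (PySem.Dict.counter l).items.map (fun p => p.2) = _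
    rw [PySem.Dict.items_counter]
    simp
  rw [hv]
  simp only [List.any_map, List.any_eq_true, Function.comp]
  have hmod : ∀ m : Nat, PySem.Int.mod ((m : Nat) : Int) (2 : Int) = ((m % 2 : Nat) : Int) := by
    intro m
    exact_mod_cast PySem.Int.mod_natCast m 2
  constructor
  · rintro ⟨c, hc, hodd⟩
    refine ⟨c, (PySem.Set.mem_ofList l c).mp hc, ?_⟩
    rw [hmod] at hodd
    simp at hodd
    omega
  · rintro ⟨c, hc, hodd⟩
    refine ⟨c, (PySem.Set.mem_ofList l c).mpr hc, ?_⟩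
    rw [hmod]
    simp
    omega

-- On a ≤-sorted c :: rest, no c survives into the dropWhile tail.
theorem pv_not_mem_dropWhile (c : Char) (rest : List Char)
    (hp : (c :: rest).Pairwise (· ≤ ·)) : c ∉ rest.dropWhile (fun x => x == c) := by
  intro hmem
  rcases List.pairwise_cons.mp hp with ⟨hcr, hprest⟩
  cases hdw : rest.dropWhile (fun x => x == c) with
  | nil => rw [hdw] at hmem; simp at hmem
  | cons d tail =>
    rw [hdw] at hmem
    have hhead := List.head?_dropWhile_not (fun x => x == c) rest
    rw [hdw] at hhead
    simp only [List.head?_cons] at hhead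
    have hdc : ¬ d = c := by simpa using hhead
    have hdrest : d ∈ rest := (List.dropWhile_sublist _).mem (hdw ▸ List.mem_cons_self)
    have hpw : (d :: tail).Pairwise (fun a b : Char => a ≤ b) :=
      hdw ▸ hprest.sublist (List.dropWhile_sublist _)
    rcases List.mem_cons.mp hmem with h | h
    · exact hdc h.symm
    · have h1 : d ≤ c := (List.pairwise_cons.mp hpw).1 c h
      have h2 : c ≤ d := hcr d hdrest
      exact hdc (le_antisymm h1 h2)

-- The head's run length is its count.
theorem pv_count_head (c : Char) (rest : List Char)
    (hp : (c :: rest).Pairwise (· ≤ ·)) :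
    (c :: rest).count c = (rest.takeWhile (fun x => x == c)).length + 1 := by
  have h1 : (rest.takeWhile (fun x => x == c)).count c
      = (rest.takeWhile (fun x => x == c)).length :=
    List.count_eq_length.mpr (fun b hb => by
      have := List.mem_takeWhile_imp hb
      simp at this
      exact this.symm)
  have h2 : (rest.dropWhile (fun x => x == c)).count c = 0 :=
    List.count_eq_zero.mpr (pv_not_mem_dropWhile c rest hp)
  have hsplit : rest.count c
      = (rest.takeWhile (fun x => x == c)).count c
        + (rest.dropWhile (fun x => x == c)).count c := by
    conv_lhs => rw [← List.takeWhile_append_dropWhile (p := fun x => x == c) (l := rest)]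
    exact List.count_append
  rw [List.count_cons_self, hsplit, h1, h2]

-- Counts of other characters survive into the dropWhile tail unchanged.
theorem pv_count_ne (c : Char) (rest : List Char) (b : Char) (hbc : b ≠ c) :
    (c :: rest).count b = (rest.dropWhile (fun x => x == c)).count b := by
  have h0 : (rest.takeWhile (fun x => x == c)).count b = 0 :=
    List.count_eq_zero.mpr (fun hb => by
      have := List.mem_takeWhile_imp hb
      simp at this
      exact hbc this)
  have hsplit : rest.count b
      = (rest.takeWhile (fun x => x == c)).count b
        + (rest.dropWhile (fun x => x == c)).count b := by
    conv_lhs => rw [← List.takeWhile_append_dropWhile (p := fun x => x == c) (l := rest)]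
    exact List.count_append
  rw [List.count_cons_of_ne (Ne.symm hbc), hsplit, h0]
  omega

-- Membership splits into the head's character and the dropWhile tail.
theorem pv_mem_iff (c : Char) (rest : List Char) (x : Char) :
    x ∈ c :: rest ↔ x = c ∨ x ∈ rest.dropWhile (fun x => x == c) := by
  constructor
  · intro hx
    rcases List.mem_cons.mp hx with h | h
    · exact Or.inl h
    · rw [← List.takeWhile_append_dropWhile (p := fun x => x == c) (l := rest)] at h
      rcases List.mem_append.mp h with h | h
      · have := List.mem_takeWhile_imp h
        simp at this
        exact Or.inl this
      · exact Or.inr h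
  · rintro (rfl | h)
    · exact List.mem_cons_self
    · exact List.mem_cons_of_mem _ ((List.dropWhile_sublist _).mem h)

-- On a ≤-sorted list, the run scan succeeds iff every character count is even.
theorem pv_runsEven_iff : ∀ (l : List Char), l.Pairwise (· ≤ ·) →
    (pvRunsEven l = true ↔ ∀ c ∈ l, l.count c % 2 = 0) := by
  intro l
  induction l using pvRunsEven.induct with
  | case1 => intro _; simp [pvRunsEven]
  | case2 c rest j hj =>
    intro hp
    simp only [pvRunsEven]
    rw [if_pos hj]
    apply iff_of_false (by simp)
    intro hall
    have := hall c List.mem_cons_self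
    rw [pv_count_head c rest hp] at this
    omega
  | case3 c rest j hj ih =>
    intro hp
    simp only [pvRunsEven]
    rw [if_neg hj]
    have hpd : (rest.dropWhile (fun x => x == c)).Pairwise (· ≤ ·) :=
      (List.pairwise_cons.mp hp).2.sublist (List.dropWhile_sublist _)
    rw [ih hpd]
    have hnotmem := pv_not_mem_dropWhile c rest hp
    constructor
    · intro h x hx
      rcases (pv_mem_iff c rest x).mp hx with hxe | hxd
      · rw [hxe, pv_count_head c rest hp]; omega
      · have hxc : x ≠ c := fun he => hnotmem (he ▸ hxd)
        rw [pv_count_ne c rest x hxc]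
        exact h x hxd
    · intro h x hxd
      have hxc : x ≠ c := fun he => hnotmem (he ▸ hxd)
      have := h x ((pv_mem_iff c rest x).mpr (Or.inr hxd))
      rw [pv_count_ne c rest x hxc] at this
      exact this

-- ===== VERDICT (by name: the statement is the Claim_ definition above) =====
theorem sieve_for_even_counts_spec : Claim_equal_sieve_for_even_counts := by
  intro num _
  unfold Spec_sieve_for_even_counts sieve_for_even_counts sieve_for_even_counts_alt
  simp only []
  set l := PySem.Int.toChars num with hl
  by_cases hlen : l.length % 2 > 0
  · simp [hlen]
  · simp only [hlen, if_false]
    have hperm := PySem.List.sorted_perm l (fun c => c) false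
    have hpw : (PySem.List.sorted l (fun c => c) false).Pairwise (· ≤ ·) := by
      simpa using PySem.List.sorted_pairwise l (fun c => c)
    by_cases hA : (l.foldl (fun d c => (d.setdefault c (0 : Int)).modify c 0 (· + 1))
        PySem.Dict.empty).values.any (fun v => decide (PySem.Int.mod v 2 > 0)) = true
    · rw [if_pos hA]
      rcases (pv_anyA l).mp hA with ⟨c, hc, hodd⟩
      cases hb : pvRunsEven (PySem.List.sorted l (fun c => c) false) with
      | false => rfl
      | true =>
        exfalso
        have hall := (pv_runsEven_iff _ hpw).mp hb
        have := hall c (hperm.mem_iff.mpr hc)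
        rw [hperm.count_eq] at this
        omega
    · rw [if_neg hA]
      symm
      rw [pv_runsEven_iff _ hpw]
      intro x hx
      rw [hperm.count_eq]
      by_contra hodd
      exact hA ((pv_anyA l).mpr ⟨x, hperm.subset hx, by omega⟩)
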